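-- pv_equiv track=rewrite | github.com/Leapense/problems | 21187번: Pulling Their Weight/balance_solver.py | find_balance_point
-- ===== SOURCE A (Python) =====
-- MAX_WEIGHT = 20000
--
-- def find_balance_point(m, weights):
--     if not weights:
--         return 1
--
--     freq = [0] * (MAX_WEIGHT + 1)
--
--     for w in weights:
--         if 0 < w <= MAX_WEIGHT:
--             freq[w] += 1
--
--     total = sum(w * freq[w] for w in range(MAX_WEIGHT + 1))
--     prefix_weighted_sum = 0
--
--     for t in range(1, MAX_WEIGHT + 2):
--         current_t_weight_contribution = 0
--         if t <= MAX_WEIGHT: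
--             current_t_weight_contribution = t * freq[t]
--
--         if 2 * prefix_weighted_sum + current_t_weight_contribution == total:
--             return t
--
--         if t <= MAX_WEIGHT:
--             prefix_weighted_sum += t * freq[t]
--
--     return None
-- ===== SOURCE B (Python) =====
-- MAX_WEIGHT = 20000
--
-- def find_balance_point(m, weights):
--     # One pass to count valid weights and sum them; then walk the sorted
--     # distinct present values instead of scanning every t in 1..MAX_WEIGHT+1.
--     total = 0
--     cnt = {}
--     for w in weights:
--         if 0 < w <= MAX_WEIGHT:
--             total += w
--             cnt[w] = cnt.get(w, 0) + 1
--     if not cnt: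
--         # no valid weight: threshold 1 trivially balances (0 == 0)
--         return 1
--     vals = sorted(cnt)
--     below = 0
--     for i, p in enumerate(vals):
--         here = p * cnt[p]
--         if 2 * below + here == total:
--             return p
--         below += here
--         if 2 * below == total and (i + 1 == len(vals) or vals[i + 1] > p + 1):
--             return p + 1
--     return None
-- ===== Notes on version B (the rewrite author's own statement) =====
-- stated objective: alternative
-- what changed: A builds a 20001-slot frequency array and scans every threshold t=1..20001 with a running prefix; B counts the valid weights into a dict in one pass and walks only the sorted distinct present values, checking each present value and the gap candidate p+1 after a half-sum point.
import Mathlib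
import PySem

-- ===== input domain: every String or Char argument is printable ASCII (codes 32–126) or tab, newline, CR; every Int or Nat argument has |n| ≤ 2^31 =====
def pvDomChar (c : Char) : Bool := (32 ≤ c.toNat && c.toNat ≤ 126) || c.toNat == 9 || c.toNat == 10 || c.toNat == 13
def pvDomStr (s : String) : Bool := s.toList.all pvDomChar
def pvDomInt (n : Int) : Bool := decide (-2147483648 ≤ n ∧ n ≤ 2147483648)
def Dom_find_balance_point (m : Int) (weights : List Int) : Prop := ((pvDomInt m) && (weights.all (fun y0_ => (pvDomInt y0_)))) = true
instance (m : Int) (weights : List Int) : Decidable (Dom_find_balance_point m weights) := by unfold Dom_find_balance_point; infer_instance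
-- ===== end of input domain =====

-- B replaces A's fixed scan over every threshold t = 1..20001 over a frequency array by a
-- single counting pass plus a walk over the sorted distinct present weights (alternative decomposition).

-- ===== PORT A =====
-- the Python list freq (fixed size 20001) is ported as Array Int; every index used
-- (w and t under their guards) is nonnegative and in range, so setIfInBounds/getD at
-- .toNat are exact renderings of freq[w] += 1 and freq[t] here.
def aFreqStep (freq : Array Int) (w : Int) : Array Int :=
  if 0 < w ∧ w ≤ 20000 then freq.setIfInBounds w.toNat (freq.getD w.toNat 0 + 1) else freq

-- the 'for t in range(1, MAX_WEIGHT + 2)' loop with its early return and running prefix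
def aLoop (freq : Array Int) (total : Int) : List Int → Int → Option Int
  | [], _ => none
  | t :: ts, pre =>
    let contrib : Int := if t ≤ 20000 then t * freq.getD t.toNat 0 else 0
    if 2 * pre + contrib = total then some t
    else aLoop freq total ts (if t ≤ 20000 then pre + t * freq.getD t.toNat 0 else pre)

def find_balance_point (m : Int) (weights : List Int) : Option Int :=
  if weights = [] then some 1
  else
    let freq := weights.foldl aFreqStep (Array.replicate 20001 0)
    let total := (PySem.List.pyRange 0 20001 1).foldl
      (fun acc w => acc + w * freq.getD w.toNat 0) 0
    aLoop freq total (PySem.List.pyRange 1 20002 1) 0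

-- ===== PORT B =====
-- single pass building the running total and the counter dict
def bFoldStep (tc : Int × PySem.Dict Int Int) (w : Int) : Int × PySem.Dict Int Int :=
  if 0 < w ∧ w ≤ 20000 then (tc.1 + w, tc.2.insert w (tc.2.getD w 0 + 1)) else tc

-- the walk over the sorted distinct values; Python's 'vals[i+1]' is the head of the rest
def bWalk (cnt : PySem.Dict Int Int) (total : Int) : List Int → Int → Option Int
  | [], _ => none
  | p :: rest, below =>
    let here := p * cnt.getD p 0
    if 2 * below + here = total then some p
    else
      let gap : Bool := match rest with | [] => true | q :: _ => decide (p + 1 < q)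
      if 2 * (below + here) = total ∧ gap = true then some (p + 1)
      else bWalk cnt total rest (below + here)

def find_balance_point_alt (m : Int) (weights : List Int) : Option Int :=
  let tc := weights.foldl bFoldStep (0, PySem.Dict.empty)
  if tc.2.items.isEmpty then some 1
  else
    let vals := PySem.List.sorted tc.2.keys (fun x => x) false
    bWalk tc.2 tc.1 vals 0

-- ===== PRECONDITION & SPEC =====
def Spec_find_balance_point (m : Int) (weights : List Int) (out : Option Int) : Prop := out = find_balance_point_alt m weights
instance (m : Int) (weights : List Int) (out : Option Int) : Decidable (Spec_find_balance_point m weights out) := by unfold Spec_find_balance_point; infer_instance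

-- ===== CLAIM (what is proved, stated in full; the proofs are below) =====
def Claim_equal_find_balance_point : Prop := ∀ (m : Int) (weights : List Int), Dom_find_balance_point m weights → Spec_find_balance_point m weights (find_balance_point m weights)

-- ===== LEMMAS AND PROOFS =====

-- the valid part of the input
def pvF (weights : List Int) : List Int := weights.filter (fun w => decide (0 < w) && decide (w ≤ 20000))

-- total weight sitting exactly at threshold t
def pvG (F : List Int) (t : Int) : Int := t * (F.count t : Int)

-- abstract forward scanner: first t in the list with 2*prefix + g t = total
def scanF (g : Int → Int) (total : Int) : List Int → Int → Option Int
  | [], _ => none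
  | t :: ts, p => if 2 * p + g t = total then some t else scanF g total ts (p + g t)

theorem mem_pvF {ws : List Int} {w : Int} (h : w ∈ pvF ws) : 0 < w ∧ w ≤ 20000 := by
  have := (List.mem_filter.mp h).2
  simpa using this

theorem scanF_cons (g : Int → Int) (total t p : Int) (ts : List Int) :
    scanF g total (t :: ts) p =
      if 2 * p + g t = total then some t else scanF g total ts (p + g t) := rfl

theorem bWalk_cons (cnt : PySem.Dict Int Int) (total p below : Int) (rest : List Int) :
    bWalk cnt total (p :: rest) below =
      (if 2 * below + p * cnt.getD p 0 = total then some p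
       else if 2 * (below + p * cnt.getD p 0) = total ∧
              (match rest with | [] => true | q :: _ => decide (p + 1 < q)) = true
            then some (p + 1)
            else bWalk cnt total rest (below + p * cnt.getD p 0)) := rfl

theorem aLoop_cons (freq : Array Int) (total t pre : Int) (ts : List Int) :
    aLoop freq total (t :: ts) pre =
      (if 2 * pre + (if t ≤ 20000 then t * freq.getD t.toNat 0 else 0) = total then some t
       else aLoop freq total ts (if t ≤ 20000 then pre + t * freq.getD t.toNat 0 else pre)) := rfl

theorem map_sum_zero (g : Int → Int) (l : List Int) (hz : ∀ t ∈ l, g t = 0) :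
    (l.map g).sum = 0 := by
  induction l with
  | nil => rfl
  | cons t ts ih => simp [hz t (by simp), ih (fun x hx => hz x (by simp [hx]))]

theorem scanF_append (g : Int → Int) (total : Int) (l1 l2 : List Int) (p : Int) :
    scanF g total (l1 ++ l2) p =
      ((scanF g total l1 p).elim (scanF g total l2 (p + (l1.map g).sum)) some) := by
  induction l1 generalizing p with
  | nil => simp [scanF]
  | cons t ts ih =>
    by_cases h : 2 * p + g t = total
    · simp [scanF_cons, h]
    · simp only [List.cons_append, scanF_cons, if_neg h, ih, List.map_cons, List.sum_cons,
        add_assoc]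

theorem scanF_zero (g : Int → Int) (total : Int) (l : List Int) (p : Int)
    (hz : ∀ t ∈ l, g t = 0) (hp : 2 * p ≠ total) : scanF g total l p = none := by
  induction l with
  | nil => rfl
  | cons t ts ih =>
    rw [scanF_cons, hz t (by simp)]
    simp only [add_zero]
    rw [if_neg hp]
    exact ih (fun x hx => hz x (by simp [hx]))

-- Σ over a nodup list of the indicator "t = x" times x, when x is in the list
theorem sum_indicator (x : Int) (ts : List Int) (hx : x ∈ ts) (hnd : ts.Nodup) :
    (ts.map (fun t => if x = t then x else 0)).sum = x := by
  induction ts with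
  | nil => simp at hx
  | cons t ts ih =>
    rcases List.nodup_cons.mp hnd with ⟨hnt, hnd'⟩
    rcases List.mem_cons.mp hx with h | h
    · subst h
      have hz : (ts.map (fun t => if x = t then x else 0)).sum = 0 :=
        map_sum_zero _ _ (fun t ht => by
          have hne : x ≠ t := fun he => hnt (he ▸ ht)
          simp [hne])
      rw [List.map_cons, List.sum_cons, hz, if_pos rfl, add_zero]
    · have hxt : x ≠ t := fun he => hnt (he ▸ h)
      rw [List.map_cons, List.sum_cons, if_neg hxt, ih h hnd', zero_add]

-- Σ_{t ∈ ts} t * count t F = F.sum when F's elements all lie in the nodup list ts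
theorem sum_mul_count (F ts : List Int) (hsub : ∀ w ∈ F, w ∈ ts) (hnd : ts.Nodup) :
    (ts.map (fun t => pvG F t)).sum = F.sum := by
  induction F with
  | nil => exact map_sum_zero _ _ (fun t _ => by simp [pvG])
  | cons x F' ih =>
    have hstep : ∀ t : Int, pvG (x :: F') t = pvG F' t + (if x = t then x else 0) := by
      intro t
      simp only [pvG, List.count_cons]
      by_cases h : x = t
      · subst h; simp; ring
      · have hb : ((t : Int) == x) = false := by
          simp only [beq_eq_false_iff_ne, ne_eq]
          exact fun he => h he.symm
        simp [hb, h]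
    calc (ts.map (fun t => pvG (x :: F') t)).sum
        = (ts.map (fun t => pvG F' t + (if x = t then x else 0))).sum :=
          congrArg List.sum (List.map_congr_left (fun t _ => hstep t))
      _ = (ts.map (fun t => pvG F' t)).sum + (ts.map (fun t => if x = t then x else 0)).sum :=
          PySem.List.sum_map_add_int ts _ _
      _ = F'.sum + x := by
          rw [ih (fun w hw => hsub w (by simp [hw])), sum_indicator x ts (hsub x (by simp)) hnd]
      _ = (x :: F').sum := by simp; ring

theorem pvF_cons_pos {w : Int} (ws : List Int) (hw : 0 < w ∧ w ≤ 20000) :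
    pvF (w :: ws) = w :: pvF ws := by
  simp [pvF, List.filter_cons, hw.1, hw.2]

theorem pvF_cons_neg {w : Int} (ws : List Int) (hw : ¬(0 < w ∧ w ≤ 20000)) :
    pvF (w :: ws) = pvF ws := by
  have hc : ¬((decide (0 < w) && decide (w ≤ 20000)) = true) := by
    simpa [Bool.and_eq_true] using hw
  simp only [pvF, List.filter_cons, if_neg hc]

-- the frequency-array fold counts occurrences of each valid weight
theorem freq_fold (ws : List Int) : ∀ (freq0 : Array Int), freq0.size = 20001 →
    (ws.foldl aFreqStep freq0).size = 20001 ∧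
    ∀ t : Int, 0 ≤ t → t ≤ 20000 →
      (ws.foldl aFreqStep freq0).getD t.toNat 0 = freq0.getD t.toNat 0 + ((pvF ws).count t : Int) := by
  induction ws with
  | nil => intro freq0 h0; exact ⟨h0, fun t _ _ => by simp [pvF]⟩
  | cons w ws ih =>
    intro freq0 h0
    by_cases hw : 0 < w ∧ w ≤ 20000
    · have hstep : aFreqStep freq0 w = freq0.setIfInBounds w.toNat (freq0.getD w.toNat 0 + 1) := by
        simp [aFreqStep, hw]
      have hlen : (freq0.setIfInBounds w.toNat (freq0.getD w.toNat 0 + 1)).size = 20001 := by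
        simp [h0]
      obtain ⟨hL, hG⟩ := ih _ hlen
      refine ⟨by simpa [hstep] using hL, fun t ht0 ht2 => ?_⟩
      have hset : (freq0.setIfInBounds w.toNat (freq0.getD w.toNat 0 + 1)).getD t.toNat 0 =
          freq0.getD t.toNat 0 + (if t = w then 1 else 0) := by
        by_cases he : t = w
        · subst he
          have hlt : t.toNat < freq0.size := by omega
          simp [Array.getD_eq_getD_getElem?, Array.getElem?_setIfInBounds, hlt]
        · have hne : w.toNat ≠ t.toNat := by omega
          simp [Array.getD_eq_getD_getElem?, Array.getElem?_setIfInBounds, hne, he]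
      have hcount : ((pvF (w :: ws)).count t : Int) = ((pvF ws).count t : Int) + (if t = w then 1 else 0) := by
        rw [pvF_cons_pos ws hw]
        by_cases he : t = w
        · subst he; simp [List.count_cons]
        · have hb : ((t : Int) == w) = false := by
            simp only [beq_eq_false_iff_ne, ne_eq]; exact he
          simp [List.count_cons, hb, he, Ne.symm he]
      rw [List.foldl_cons, hstep, hG t ht0 ht2, hset, hcount]
      ring
    · have hstep : aFreqStep freq0 w = freq0 := by simp [aFreqStep, hw]
      rw [List.foldl_cons, hstep, pvF_cons_neg ws hw]
      exact ih freq0 h0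

-- the B-side fold builds (sum of valid weights, counter of valid weights)
theorem b_fold (ws : List Int) : ∀ (t0 : Int) (d0 : PySem.Dict Int Int),
    ws.foldl bFoldStep (t0, d0) =
      (t0 + (pvF ws).sum, (pvF ws).foldl (fun d x => d.insert x (d.getD x 0 + 1)) d0) := by
  induction ws with
  | nil => intro t0 d0; simp [pvF]
  | cons w ws ih =>
    intro t0 d0
    by_cases hw : 0 < w ∧ w ≤ 20000
    · rw [List.foldl_cons, show bFoldStep (t0, d0) w = (t0 + w, d0.insert w (d0.getD w 0 + 1)) by
        simp [bFoldStep, hw]]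
      rw [ih, pvF_cons_pos ws hw]
      simp [List.sum_cons]
      ring
    · rw [List.foldl_cons, show bFoldStep (t0, d0) w = (t0, d0) by simp [bFoldStep, hw]]
      rw [ih, pvF_cons_neg ws hw]

-- A's t-loop is the abstract scanner once the contributions agree
theorem aLoop_eq_scanF (freq : Array Int) (total : Int) (g : Int → Int)
    (h : ∀ t : Int, 1 ≤ t → t ≤ 20001 →
      (if t ≤ 20000 then t * freq.getD t.toNat 0 else 0) = g t) :
    ∀ ts : List Int, (∀ t ∈ ts, 1 ≤ t ∧ t ≤ 20001) → ∀ p : Int,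
      aLoop freq total ts p = scanF g total ts p := by
  intro ts
  induction ts with
  | nil => intro _ p; rfl
  | cons t ts ih =>
    intro hmem p
    obtain ⟨h1, h2⟩ := hmem t (by simp)
    have hc : (if t ≤ 20000 then t * freq.getD t.toNat 0 else 0) = g t := h t h1 h2
    have hrec : (if t ≤ 20000 then p + t * freq.getD t.toNat 0 else p) = p + g t := by
      rw [← hc]; split_ifs <;> simp
    rw [aLoop_cons, scanF_cons, hc, hrec]
    by_cases hif : 2 * p + g t = total
    · simp [hif]
    · simp only [if_neg hif]
      exact ih (fun x hx => hmem x (by simp [hx])) _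

-- the core segment lemma: scanning every t from a upwards matches the walk over the
-- sorted present values, given that g vanishes off the present values
theorem seg (g : Int → Int) (cnt : PySem.Dict Int Int) (total : Int)
    (hg : ∀ p : Int, p * cnt.getD p 0 = g p) :
    ∀ (vals : List Int) (a below : Int),
    vals.Pairwise (· < ·) →
    (∀ v ∈ vals, a ≤ v ∧ v ≤ 20000) →
    (∀ t : Int, a ≤ t → t ∉ vals → g t = 0) →
    (∀ v ∈ vals, 0 < g v) →
    (2 * below = total → ∃ l, vals = a :: l) →
    scanF g total (PySem.List.pyRange a 20002 1) below = bWalk cnt total vals below := by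
  intro vals
  induction vals with
  | nil =>
    intro a below _ _ hoff _ hinv
    have hb : 2 * below ≠ total := fun hb => by
      obtain ⟨l, hl⟩ := hinv hb
      exact (List.cons_ne_nil a l) hl.symm
    rw [scanF_zero g total _ below
      (fun t ht => hoff t (PySem.List.mem_pyRange_one.mp ht).1 (by simp)) hb]
    rfl
  | cons p rest ih =>
    intro a below hpw hbnd hoff hpos hinv
    obtain ⟨hap, hp20⟩ := hbnd p (by simp)
    have hrest_gt : ∀ q ∈ rest, p < q := (List.pairwise_cons.mp hpw).1
    have hpw' : rest.Pairwise (· < ·) := (List.pairwise_cons.mp hpw).2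
    have hz1 : ∀ t ∈ PySem.List.pyRange a p 1, g t = 0 := by
      intro t ht
      obtain ⟨hta, htp⟩ := PySem.List.mem_pyRange_one.mp ht
      refine hoff t hta ?_
      simp only [List.mem_cons]
      push_neg
      exact ⟨by omega, fun hr => by have := hrest_gt t hr; omega⟩
    have h1 : scanF g total (PySem.List.pyRange a p 1) below = none := by
      by_cases hb : 2 * below = total
      · obtain ⟨l, hl⟩ := hinv hb
        injection hl with hpa _
        rw [PySem.List.pyRange_one_eq_nil (by omega)]
        rfl
      · exact scanF_zero g total _ below hz1 hb
    rw [PySem.List.pyRange_one_append a p 20002 hap (by omega), scanF_append, h1]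
    simp only [Option.elim]
    rw [map_sum_zero g _ hz1, add_zero]
    rw [PySem.List.pyRange_one_cons (show p < 20002 by omega), scanF_cons, bWalk_cons, hg p]
    by_cases hfire : 2 * below + g p = total
    · rw [if_pos hfire, if_pos hfire]
    · rw [if_neg hfire, if_neg hfire]
      -- hmem1 : the next threshold p+1 is not a present value when the gap is real
      rcases rest with _ | ⟨q, rest'⟩
      · -- rest = []
        by_cases h2 : 2 * (below + g p) = total
        · rw [if_pos ⟨h2, rfl⟩]
          have hg1 : g (p + 1) = 0 := by
            refine hoff (p + 1) (by omega) ?_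
            simp only [List.mem_cons, List.not_mem_nil, or_false]
            omega
          rw [PySem.List.pyRange_one_cons (show p + 1 < 20002 by omega), scanF_cons, hg1,
            add_zero, if_pos h2]
        · rw [if_neg (fun hC => h2 hC.1)]
          exact ih (p + 1) (below + g p) (by simp)
            (fun v hv => by simp at hv)
            (fun t ht htm => hoff t (by omega) (by
              simp only [List.mem_cons, List.not_mem_nil, or_false]; omega))
            (fun v hv => by simp at hv)
            (fun hb => absurd hb h2)
      · -- rest = q :: rest'
        have hq0 : p < q := hrest_gt q (by simp)
        have hq20 : q ≤ 20000 := (hbnd q (by simp)).2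
        have hrest'_gt : ∀ x ∈ rest', q < x := (List.pairwise_cons.mp hpw').1
        by_cases h2 : 2 * (below + g p) = total
        · by_cases hq : p + 1 < q
          · rw [if_pos ⟨h2, by simp [hq]⟩]
            have hg1 : g (p + 1) = 0 := by
              refine hoff (p + 1) (by omega) ?_
              simp only [List.mem_cons]
              push_neg
              refine ⟨by omega, by omega, fun hx => ?_⟩
              have := hrest'_gt (p + 1) hx; omega
            rw [PySem.List.pyRange_one_cons (show p + 1 < 20002 by omega), scanF_cons, hg1,
              add_zero, if_pos h2]
          · have hq1 : q = p + 1 := by omega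
            rw [if_neg (fun hC => by
              have := hC.2
              simp only [decide_eq_true_eq] at this
              exact hq this)]
            refine ih (p + 1) (below + g p) hpw'
              (fun v hv => ⟨by have := hrest_gt v hv; omega, (hbnd v (by simp [hv])).2⟩)
              (fun t ht htm => hoff t (by omega) (by
                simp only [List.mem_cons] at htm ⊢
                push_neg at htm ⊢
                exact ⟨by omega, htm⟩))
              (fun v hv => hpos v (by simp [hv]))
              (fun _ => ⟨rest', by rw [hq1]⟩)
        · rw [if_neg (fun hC => h2 hC.1)]
          exact ih (p + 1) (below + g p) hpw'
            (fun v hv => ⟨by have := hrest_gt v hv; omega, (hbnd v (by simp [hv])).2⟩)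
            (fun t ht htm => hoff t (by omega) (by
              simp only [List.mem_cons] at htm ⊢
              push_neg at htm ⊢
              exact ⟨by omega, htm⟩))
            (fun v hv => hpos v (by simp [hv]))
            (fun hb => absurd hb h2)

theorem total_pos {F : List Int} (hne : F ≠ []) (hmem : ∀ w ∈ F, 0 < w) : 0 < F.sum := by
  match F, hne with
  | x :: F', _ =>
    have h1 := hmem x (by simp)
    have h2 : 0 ≤ F'.sum := List.sum_nonneg (fun y hy => le_of_lt (hmem y (by simp [hy])))
    rw [List.sum_cons]
    omega

-- A reduced to the abstract scanner
theorem A_eq_scan (m : Int) (ws : List Int) (hne : ws ≠ []) :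
    find_balance_point m ws =
      scanF (pvG (pvF ws)) (pvF ws).sum (PySem.List.pyRange 1 20002 1) 0 := by
  unfold find_balance_point
  rw [if_neg hne]
  obtain ⟨hL, hG⟩ := freq_fold ws (Array.replicate 20001 0) Array.size_replicate
  have hget : ∀ t : Int, 0 ≤ t → t ≤ 20000 →
      (ws.foldl aFreqStep (Array.replicate 20001 0)).getD t.toNat 0 = ((pvF ws).count t : Int) := by
    intro t h0 h2
    rw [hG t h0 h2]
    have hz : (Array.replicate 20001 (0 : Int)).getD t.toNat 0 = 0 := by
      rw [Array.getD_eq_getD_getElem?, Array.getElem?_replicate]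
      split <;> rfl
    rw [hz, zero_add]
  show aLoop (ws.foldl aFreqStep (Array.replicate 20001 0))
      ((PySem.List.pyRange 0 20001 1).foldl
        (fun acc w => acc + w * (ws.foldl aFreqStep (Array.replicate 20001 0)).getD w.toNat 0) 0)
      (PySem.List.pyRange 1 20002 1) 0 = _
  have htotal : ((PySem.List.pyRange 0 20001 1).foldl
      (fun acc w => acc + w * (ws.foldl aFreqStep (Array.replicate 20001 0)).getD w.toNat 0) 0)
      = (pvF ws).sum := by
    rw [PySem.List.foldl_add]
    rw [List.map_congr_left (g := fun w => pvG (pvF ws) w) (fun w hw => by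
      obtain ⟨hw0, hw1⟩ := PySem.List.mem_pyRange_one.mp hw
      rw [hget w hw0 (by omega)]
      rfl)]
    rw [sum_mul_count (pvF ws) _ (fun w hw => by
        obtain ⟨h1, h2⟩ := mem_pvF hw
        exact PySem.List.mem_pyRange_one.mpr ⟨by omega, by omega⟩)
      (PySem.List.nodup_pyRange_one 0 20001)]
    ring
  rw [htotal]
  refine aLoop_eq_scanF _ _ _ (fun t h1 h2 => ?_) _
    (fun t ht => by
      obtain ⟨ha, hb⟩ := PySem.List.mem_pyRange_one.mp ht
      exact ⟨ha, by omega⟩) 0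
  by_cases ht : t ≤ 20000
  · rw [if_pos ht, hget t (by omega) ht]
    rfl
  · rw [if_neg ht]
    have ht' : t = 20001 := by omega
    subst ht'
    have hc : (pvF ws).count (20001 : Int) = 0 :=
      List.count_eq_zero.mpr (fun hm => by have := mem_pvF hm; omega)
    simp [pvG, hc]

-- B normalized: the one-pass fold is (sum of valid weights, counter of valid weights)
theorem alt_eq (m : Int) (ws : List Int) :
    find_balance_point_alt m ws =
      (if (PySem.Dict.counter (pvF ws)).items.isEmpty then some 1
       else bWalk (PySem.Dict.counter (pvF ws)) (pvF ws).sum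
        (PySem.List.sorted (PySem.Dict.counter (pvF ws)).keys (fun x => x) false) 0) := by
  have htc : ws.foldl bFoldStep (0, PySem.Dict.empty)
      = ((pvF ws).sum, PySem.Dict.counter (pvF ws)) := by
    rw [b_fold ws 0 PySem.Dict.empty, PySem.Dict.foldl_insert_getD_add_one_eq_counter, zero_add]
  unfold find_balance_point_alt
  show (if (ws.foldl bFoldStep (0, PySem.Dict.empty)).2.items.isEmpty then some 1
        else bWalk (ws.foldl bFoldStep (0, PySem.Dict.empty)).2
          (ws.foldl bFoldStep (0, PySem.Dict.empty)).1
          (PySem.List.sorted (ws.foldl bFoldStep (0, PySem.Dict.empty)).2.keys (fun x => x) false) 0) = _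
  rw [htc]

-- ===== VERDICT (by name: the statement is the Claim_ definition above) =====
theorem find_balance_point_spec : Claim_equal_find_balance_point := by
  intro m ws _
  unfold Spec_find_balance_point
  rw [alt_eq]
  by_cases hFe : pvF ws = []
  · rw [hFe]
    rw [if_pos (by rfl)]
    by_cases hwe : ws = []
    · unfold find_balance_point
      rw [if_pos hwe]
    · rw [A_eq_scan m ws hwe, hFe]
      rw [PySem.List.pyRange_one_cons (show (1:Int) < 20002 by norm_num), scanF_cons]
      rw [if_pos (by simp [pvG])]
  · have hmemF : ∀ v : Int, v ∈ PySem.List.sorted (PySem.Dict.counter (pvF ws)).keys (fun x => x) false ↔ v ∈ pvF ws := by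
      intro v
      rw [PySem.List.mem_sorted, PySem.Dict.keys_counter, PySem.Set.mem_ofList]
    have hne_ws : ws ≠ [] := fun h => hFe (by simp [pvF, h])
    have hsum_pos : 0 < (pvF ws).sum :=
      total_pos hFe (fun w hw => (mem_pvF hw).1)
    have hitems : (PySem.Dict.counter (pvF ws)).items.isEmpty = false := by
      rw [PySem.Dict.items_counter]
      match hF : pvF ws, hFe with
      | x :: F', _ =>
        have hx : x ∈ PySem.Set.ofList (x :: F') := (PySem.Set.mem_ofList _ x).mpr (by simp)
        match hS : PySem.Set.ofList (x :: F'), hx with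
        | y :: S', _ => rfl
    rw [if_neg (by simp [hitems])]
    rw [A_eq_scan m ws hne_ws]
    refine seg (pvG (pvF ws)) (PySem.Dict.counter (pvF ws)) (pvF ws).sum
      (fun p => by rw [PySem.Dict.getD_counter]; rfl)
      _ 1 0
      (by rw [PySem.Dict.keys_counter]; exact PySem.List.sorted_ofList_pairwise_lt (pvF ws))
      (fun v hv => by
        obtain ⟨h1, h2⟩ := mem_pvF ((hmemF v).mp hv)
        exact ⟨by omega, h2⟩)
      (fun t _ htm => by
        have : t ∉ pvF ws := fun hm => htm ((hmemF t).mpr hm)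
        simp [pvG, List.count_eq_zero.mpr this])
      (fun v hv => by
        have hvF := (hmemF v).mp hv
        have h1 := (mem_pvF hvF).1
        have h2 : 0 < ((pvF ws).count v : Int) := by
          exact_mod_cast List.count_pos_iff.mpr hvF
        exact mul_pos h1 h2)
      (fun hb => absurd hb.symm (by omega))
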